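-- pv_equiv track=rewrite | github.com/libingtong/new-api-guardian | app/breaker_logic.py | restore_model_to_list
-- ===== SOURCE A (Python) =====
-- from typing import Any, Dict, List, Optional
--
-- def normalize_str_list(values: List[Any]) -> List[str]:
--     items: List[str] = []
--     for value in values:
--         text = str(value).strip()
--         if text and text not in items:
--             items.append(text)
--     return items
--
-- def restore_model_to_list(current_items: List[str], original_items: List[str], model_name: str) -> List[str]:
--     target = str(model_name or "").strip()
--     current = normalize_str_list(current_items)
--     if not target:
--         return current
--     if target in current:
--         return current
--
--     original = normalize_str_list(original_items)
--     if target not in original: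
--         return current + [target]
--
--     target_index = original.index(target)
--     insert_at = len(current)
--     for idx in range(target_index + 1, len(original)):
--         follower = original[idx]
--         if follower in current:
--             insert_at = current.index(follower)
--             break
--     return current[:insert_at] + [target] + current[insert_at:]
-- ===== SOURCE B (Python) =====
-- from typing import Any, List
--
-- def normalize_str_list(values: List[Any]) -> List[str]:
--     items: List[str] = []
--     for value in values:
--         text = str(value).strip()
--         if text and text not in items:
--             items.append(text)
--     return items
--
-- def restore_model_to_list(current_items: List[str], original_items: List[str], model_name: str) -> List[str]:
--     target = str(model_name or "").strip()
--     current = normalize_str_list(current_items)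
--     if not target or target in current:
--         return current
--     original = normalize_str_list(original_items)
--     if target not in original:
--         return current + [target]
--     pos = {m: i for i, m in enumerate(original)}
--     t = pos[target]
--     best = None  # (original index, position in current) of the best follower seen
--     for j, item in enumerate(current):
--         oi = pos.get(item)
--         if oi is not None and oi > t:
--             if best is None or oi < best[0]:
--                 best = (oi, j)
--     insert_at = best[1] if best is not None else len(current)
--     return current[:insert_at] + [target] + current[insert_at:]
-- ===== Notes on version B (the rewrite author's own statement) =====
-- stated objective: alternative
-- what changed: Replaces A's forward scan over the original list (with an inner membership test and list.index per candidate) by one pass over the current list that picks, via a precomputed name-to-original-index dict, the current element of minimum original index greater than the target's; the insertion point is that element's position in current.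
import Mathlib
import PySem

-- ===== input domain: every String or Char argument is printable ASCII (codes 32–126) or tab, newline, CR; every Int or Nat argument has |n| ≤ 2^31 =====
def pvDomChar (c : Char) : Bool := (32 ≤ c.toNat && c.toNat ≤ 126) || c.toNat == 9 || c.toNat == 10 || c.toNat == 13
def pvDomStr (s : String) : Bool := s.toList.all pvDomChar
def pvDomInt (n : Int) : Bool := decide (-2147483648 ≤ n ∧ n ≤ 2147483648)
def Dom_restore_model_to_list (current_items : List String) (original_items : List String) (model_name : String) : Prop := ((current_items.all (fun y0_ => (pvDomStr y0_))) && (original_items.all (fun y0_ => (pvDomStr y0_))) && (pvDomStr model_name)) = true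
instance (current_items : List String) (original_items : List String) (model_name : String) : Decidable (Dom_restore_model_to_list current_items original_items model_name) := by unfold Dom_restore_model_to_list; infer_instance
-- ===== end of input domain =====

-- B replaces A's forward scan over the original list by one pass over the current list
-- that picks, via an index dict of original, the follower with minimum original index
-- (alternative decomposition; return values proved identical).

-- ===== PORT A =====

-- normalize_str_list: helper shared verbatim by Source A and Source B
def pvNorm (values : List String) : List String :=
  values.foldl
    (fun items value =>
      let text := PySem.Str.strip value
      if text ≠ "" ∧ text ∉ items then items ++ [text] else items) []

-- A's 'for idx in range(target_index + 1, len(original)): … break' loop, step for step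
def pvFindInsertA (original current : List String) : List Int → Nat
  | [] => current.length
  | i :: rest =>
    let follower := PySem.List.pyGetD original i ""   -- original[idx]; idx is always in range here
    if follower ∈ current then (PySem.List.index? current follower).getD 0  -- current.index, guarded by membership
    else pvFindInsertA original current rest

def restore_model_to_list (current_items : List String) (original_items : List String) (model_name : String) : List String :=
  let target := PySem.Str.strip model_name           -- str(model_name or "").strip()
  let current := pvNorm current_items
  if target = "" then current
  else if target ∈ current then current
  else
    let original := pvNorm original_items
    if target ∉ original then current ++ [target]
    else
      -- original.index(target): guarded by the membership test above, so index? is some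
      let target_index := (PySem.List.index? original target).getD 0
      let insert_at := pvFindInsertA original current
        (PySem.List.pyRange ((target_index : Int) + 1) (PySem.List.len original) 1)
      PySem.List.slice current none (some (insert_at : Int)) ++ [target] ++
        PySem.List.slice current (some (insert_at : Int)) none

-- ===== PORT B =====

-- body of B's 'for j, item in enumerate(current)' loop
def pvStep (pos : PySem.Dict String Int) (t : Int) (best : Option (Int × Int)) (p : Int × String) :
    Option (Int × Int) :=
  match pos.get? p.2 with
  | some oi =>
    if t < oi then
      match best with
      | none => some (oi, p.1)
      | some b => if oi < b.1 then some (oi, p.1) else best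
    else best
  | none => best

def restore_model_to_list_alt (current_items : List String) (original_items : List String) (model_name : String) : List String :=
  let target := PySem.Str.strip model_name
  let current := pvNorm current_items
  if target = "" ∨ target ∈ current then current
  else
    let original := pvNorm original_items
    if target ∉ original then current ++ [target]
    else
      -- pos = {m: i for i, m in enumerate(original)}
      let pos := (PySem.List.enumerate original 0).foldl
        (fun d p => d.insert p.2 p.1) PySem.Dict.empty
      let t := (pos.get? target).getD 0              -- pos[target]; target ∈ original here
      let best := (PySem.List.enumerate current 0).foldl (pvStep pos t) none
      let insert_at : Int := match best with | some b => b.2 | none => PySem.List.len current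
      PySem.List.slice current none (some insert_at) ++ [target] ++
        PySem.List.slice current (some insert_at) none

-- ===== PRECONDITION & SPEC =====
def Spec_restore_model_to_list (current_items : List String) (original_items : List String) (model_name : String) (out : List String) : Prop := out = restore_model_to_list_alt current_items original_items model_name
instance (current_items : List String) (original_items : List String) (model_name : String) (out : List String) : Decidable (Spec_restore_model_to_list current_items original_items model_name out) := by unfold Spec_restore_model_to_list; infer_instance

-- ===== CLAIM (what is proved, stated in full; the proofs are below) =====
def Claim_equal_restore_model_to_list : Prop := ∀ (current_items : List String) (original_items : List String) (model_name : String), Dom_restore_model_to_list current_items original_items model_name → Spec_restore_model_to_list current_items original_items model_name (restore_model_to_list current_items original_items model_name)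

-- ===== LEMMAS AND PROOFS =====

lemma pvNorm_aux (values : List String) : ∀ (acc : List String), acc.Nodup →
    (values.foldl (fun items value =>
      let text := PySem.Str.strip value
      if text ≠ "" ∧ text ∉ items then items ++ [text] else items) acc).Nodup := by
  induction values with
  | nil => intro acc h; simpa using h
  | cons v vs ih =>
    intro acc h
    simp only [List.foldl_cons]
    split
    · next hc =>
      refine ih _ ?_
      refine List.Nodup.append h (List.nodup_singleton _) ?_
      intro a ha hb
      simp only [List.mem_singleton] at hb
      subst hb
      exact hc.2 ha
    · exact ih _ h

lemma pvNorm_nodup (values : List String) : (pvNorm values).Nodup :=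
  pvNorm_aux values [] (by simp)

lemma pvIdxOf?_of_mem {x : String} {l : List String} (h : x ∈ l) :
    List.idxOf? x l = some (l.idxOf x) := by
  induction l with
  | nil => simp at h
  | cons a l ih =>
    by_cases hax : a = x
    · subst hax; simp [List.idxOf?_cons, List.idxOf_cons_self]
    · have hx : x ∈ l := by
        rcases List.mem_cons.mp h with h1 | h1
        · exact absurd h1.symm hax
        · exact h1
      rw [List.idxOf?_cons, List.idxOf_cons]
      simp [hax, ih hx, beq_false_of_ne]

lemma pvIndex?_getD {x : String} {l : List String} (h : x ∈ l) :
    (PySem.List.index? l x).getD 0 = l.idxOf x := by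
  rw [PySem.List.index?_eq_idxOf?, pvIdxOf?_of_mem h]
  rfl

-- the dict built by B's comprehension looks up the (unique) index in original
lemma pvPos_get (O : List String) (hnd : O.Nodup) (x : String) :
    ((PySem.List.enumerate O 0).foldl (fun d p => d.insert p.2 p.1) PySem.Dict.empty).get? x
      = if x ∈ O then some ((O.idxOf x : Int)) else none := by
  have hfresh : ∀ a ∈ PySem.List.enumerate O 0, (PySem.Dict.empty : PySem.Dict String Int).contains a.2 = false := by
    intro a _; simp [PySem.Dict.contains_empty]
  have hkeysnd : ((PySem.List.enumerate O 0).map (·.2)).Nodup := by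
    rw [PySem.List.map_snd_enumerate]; exact hnd
  have hitems : ((PySem.List.enumerate O 0).foldl (fun d p => d.insert p.2 p.1) (PySem.Dict.empty : PySem.Dict String Int)).items
      = PySem.Dict.empty.items ++ (PySem.List.enumerate O 0).map (fun a => (a.2, a.1)) :=
    PySem.Dict.items_foldl_insert_fresh _ _ _ _ hfresh hkeysnd
  have hkeys : ((PySem.List.enumerate O 0).foldl (fun d p => d.insert p.2 p.1) (PySem.Dict.empty : PySem.Dict String Int)).keys.Nodup :=
    PySem.Dict.nodup_keys_foldl_insert_key _ _ _ _ (by simp [PySem.Dict.keys_empty])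
  by_cases hx : x ∈ O
  · have hlt := List.idxOf_lt_length_of_mem hx
    have hmem : ((O.idxOf x : Int), x) ∈ PySem.List.enumerate O 0 := by
      rw [PySem.List.mem_enumerate_iff _ _ _]
      exact ⟨O.idxOf x, hlt, by simp [List.getElem_idxOf hlt]⟩
    have hin : (x, (O.idxOf x : Int)) ∈ ((PySem.List.enumerate O 0).foldl (fun d p => d.insert p.2 p.1) (PySem.Dict.empty : PySem.Dict String Int)).items := by
      rw [hitems]
      simp only [List.mem_append]
      right
      exact List.mem_map.mpr ⟨_, hmem, rfl⟩
    rw [if_pos hx]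
    exact PySem.Dict.get?_of_mem_items _ hin hkeys
  · rw [if_neg hx]
    rw [PySem.Dict.get?_eq_none_iff_not_mem_keys]
    simp only [PySem.Dict.keys, hitems]
    simp only [List.map_append, List.mem_append, not_or]
    constructor
    · intro h
      simp [show (PySem.Dict.empty : PySem.Dict String Int).items = [] from rfl] at h
    · intro h
      rw [List.map_map] at h
      have he : (List.map ((fun x => x.1) ∘ fun a => (a.2, a.1)) (PySem.List.enumerate O 0)) = List.map (·.2) (PySem.List.enumerate O 0) := rfl
      rw [he, PySem.List.map_snd_enumerate] at h
      exact hx h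

-- A's scan over range(t+1, len(original)) equals a find? over the tail of original
lemma pvA_loop_eq (O C : List String) :
    ∀ (k a : Nat), k = O.length - a →
      pvFindInsertA O C (PySem.List.pyRange (a : Int) (O.length : Int) 1)
        = match (O.drop a).find? (fun x => decide (x ∈ C)) with
          | some f => C.idxOf f
          | none => C.length := by
  intro k
  induction k with
  | zero =>
    intro a ha
    have hle : O.length ≤ a := by omega
    rw [PySem.List.pyRange_one_eq_nil (by exact_mod_cast hle)]
    rw [List.drop_of_length_le hle]
    simp [pvFindInsertA]
  | succ k ih =>
    intro a ha
    have hlt : a < O.length := by omega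
    rw [PySem.List.pyRange_one_cons (by exact_mod_cast hlt)]
    rw [List.drop_eq_getElem_cons hlt]
    simp only [pvFindInsertA]
    have hget : PySem.List.pyGetD O (a : Int) "" = O[a] := by
      simp [PySem.List.pyGetD_natCast, hlt]
    rw [hget]
    by_cases hc : O[a] ∈ C
    · rw [if_pos hc, List.find?_cons_of_pos (p := fun x => decide (x ∈ C)) (by simpa using hc)]
      exact pvIndex?_getD hc
    · have hcast : ((a : Int) + 1) = ((a + 1 : Nat) : Int) := by push_cast; ring
      rw [if_neg hc, hcast, ih (a + 1) (by omega),
        List.find?_cons_of_neg (p := fun x => decide (x ∈ C)) (by simpa using hc)]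

lemma pvStep_not_mem (pos : PySem.Dict String Int) (O : List String) (t : Int)
    (hpos : ∀ x, pos.get? x = if x ∈ O then some ((O.idxOf x : Int)) else none)
    (b : Option (Int × Int)) (p : Int × String) (hpO : p.2 ∉ O) :
    pvStep pos t b p = b := by
  unfold pvStep
  rw [hpos p.2, if_neg hpO]

lemma pvStep_mem (pos : PySem.Dict String Int) (O : List String) (t : Int)
    (hpos : ∀ x, pos.get? x = if x ∈ O then some ((O.idxOf x : Int)) else none)
    (b : Option (Int × Int)) (p : Int × String) (hpO : p.2 ∈ O) :
    pvStep pos t b p =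
      (if t < (O.idxOf p.2 : Int) then
        match b with
        | none => some ((O.idxOf p.2 : Int), p.1)
        | some b' => if (O.idxOf p.2 : Int) < b'.1 then some ((O.idxOf p.2 : Int), p.1) else b
      else b) := by
  unfold pvStep
  rw [hpos p.2, if_pos hpO]

-- when no element of current follows the target in original, B's loop keeps best = None
lemma pvB_fold_none (pos : PySem.Dict String Int) (O : List String) (t : Nat)
    (hpos : ∀ x, pos.get? x = if x ∈ O then some ((O.idxOf x : Int)) else none) :
    ∀ (L : List (Int × String)) (b : Option (Int × Int)),
      (∀ p ∈ L, p.2 ∈ O → ¬ t < O.idxOf p.2) →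
      L.foldl (pvStep pos (t : Int)) b = b := by
  intro L
  induction L with
  | nil => intro b _; rfl
  | cons p L ih =>
    intro b hL
    simp only [List.foldl_cons]
    have hstep : pvStep pos (t : Int) b p = b := by
      by_cases hpO : p.2 ∈ O
      · rw [pvStep_mem pos O _ hpos b p hpO]
        rw [if_neg (by exact_mod_cast hL p List.mem_cons_self hpO)]
      · exact pvStep_not_mem pos O _ hpos b p hpO
    rw [hstep]
    exact ih b (fun q hq => hL q (List.mem_cons_of_mem _ hq))

lemma pvIdxOf_inj {l : List String} {x y : String} (hx : x ∈ l) (hy : y ∈ l)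
    (h : l.idxOf x = l.idxOf y) : x = y := by
  have h1 := List.idxOf_lt_length_of_mem hx
  have h2 := List.idxOf_lt_length_of_mem hy
  have e1 : l[l.idxOf x]? = some x := by rw [List.getElem?_eq_getElem h1, List.getElem_idxOf h1]
  have e2 : l[l.idxOf y]? = some y := by rw [List.getElem?_eq_getElem h2, List.getElem_idxOf h2]
  rw [h, e2] at e1
  exact (Option.some.injEq _ _ ▸ e1).symm

-- B's loop reaches exactly the follower of minimum original index (position j₀ in current)
lemma pvB_fold_min (pos : PySem.Dict String Int) (O : List String) (t : Nat)
    (hpos : ∀ x, pos.get? x = if x ∈ O then some ((O.idxOf x : Int)) else none)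
    (x₀ : String) (hx₀ : x₀ ∈ O) (ht : t < O.idxOf x₀) (j₀ : Nat) :
    ∀ (L : List (Int × String)) (b : Option (Int × Int)),
      (∀ p ∈ L, p.2 ∈ O → t < O.idxOf p.2 → O.idxOf x₀ ≤ O.idxOf p.2) →
      (∀ p ∈ L, p.2 = x₀ → p.1 = (j₀ : Int)) →
      (b = some ((O.idxOf x₀ : Int), (j₀ : Int)) ∨
        ((b = none ∨ ∃ ob jb, b = some (ob, jb) ∧ (O.idxOf x₀ : Int) < ob) ∧ x₀ ∈ L.map (·.2))) →
      L.foldl (pvStep pos (t : Int)) b = some ((O.idxOf x₀ : Int), (j₀ : Int)) := by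
  intro L
  induction L with
  | nil =>
    intro b hb hidx hcase
    rcases hcase with h | ⟨_, hmem⟩
    · simpa using h
    · simp at hmem
  | cons p L ih =>
    intro b hmin hidx hcase
    simp only [List.foldl_cons]
    have hminL : ∀ q ∈ L, q.2 ∈ O → t < O.idxOf q.2 → O.idxOf x₀ ≤ O.idxOf q.2 :=
      fun q hq => hmin q (List.mem_cons_of_mem _ hq)
    have hidxL : ∀ q ∈ L, q.2 = x₀ → q.1 = (j₀ : Int) :=
      fun q hq => hidx q (List.mem_cons_of_mem _ hq)
    by_cases hpO : p.2 ∈ O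
    · by_cases hgt : t < O.idxOf p.2
      · have hti : (t : Int) < (O.idxOf p.2 : Int) := by exact_mod_cast hgt
        by_cases hpx : p.2 = x₀
        · -- p is the minimiser: the step lands on some (i₀, j₀)
          have hj : p.1 = (j₀ : Int) := hidx p List.mem_cons_self hpx
          have hstep : pvStep pos (t : Int) b p = some ((O.idxOf x₀ : Int), (j₀ : Int)) := by
            rw [pvStep_mem pos O _ hpos b p hpO, if_pos hti]
            rcases hcase with hb | ⟨hb, _⟩
            · subst hb
              simp only []
              rw [hpx, hj]
              simp
            · rcases hb with hb | ⟨ob, jb, hb, hob⟩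
              · subst hb
                simp only []
                rw [hpx, hj]
              · subst hb
                simp only []
                rw [hpx] at *
                rw [if_pos (by exact_mod_cast hob), hj]
          rw [hstep]
          exact ih _ hminL hidxL (Or.inl rfl)
        · -- p qualifies but lies strictly later in original than x₀
          have hlt : O.idxOf x₀ < O.idxOf p.2 := by
            rcases lt_or_eq_of_le (hmin p List.mem_cons_self hpO hgt) with h | h
            · exact h
            · exact absurd (pvIdxOf_inj hpO hx₀ h.symm) hpx
          rcases hcase with hb | ⟨hb, hmem⟩
          · subst hb
            have hstep : pvStep pos (t : Int) (some ((O.idxOf x₀ : Int), (j₀ : Int))) p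
                = some ((O.idxOf x₀ : Int), (j₀ : Int)) := by
              rw [pvStep_mem pos O _ hpos _ p hpO, if_pos hti]
              simp only []
              rw [if_neg (by exact_mod_cast not_lt.mpr (le_of_lt hlt))]
            rw [hstep]
            exact ih _ hminL hidxL (Or.inl rfl)
          · have hmemL : x₀ ∈ L.map (·.2) := by
              rcases List.mem_map.mp hmem with ⟨q, hq, hq2⟩
              rcases List.mem_cons.mp hq with rfl | hq'
              · exact absurd hq2 hpx
              · exact List.mem_map.mpr ⟨q, hq', hq2⟩
            have hworse : pvStep pos (t : Int) b p = none ∨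
                ∃ ob jb, pvStep pos (t : Int) b p = some (ob, jb) ∧ (O.idxOf x₀ : Int) < ob := by
              rw [pvStep_mem pos O _ hpos b p hpO, if_pos hti]
              rcases hb with hb | ⟨ob, jb, hb, hob⟩
              · subst hb
                simp only []
                exact Or.inr ⟨_, _, rfl, by exact_mod_cast hlt⟩
              · subst hb
                simp only []
                by_cases hcmp : (O.idxOf p.2 : Int) < ob
                · rw [if_pos hcmp]
                  exact Or.inr ⟨_, _, rfl, by exact_mod_cast hlt⟩
                · rw [if_neg hcmp]
                  exact Or.inr ⟨_, _, rfl, hob⟩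
            exact ih _ hminL hidxL (Or.inr ⟨hworse, hmemL⟩)
      · -- p's original index is not after the target: the step keeps b
        have hstep : pvStep pos (t : Int) b p = b := by
          rw [pvStep_mem pos O _ hpos b p hpO]
          rw [if_neg (by exact_mod_cast hgt)]
        rw [hstep]
        rcases hcase with hb | ⟨hb, hmem⟩
        · exact ih _ hminL hidxL (Or.inl hb)
        · have hmemL : x₀ ∈ L.map (·.2) := by
            rcases List.mem_map.mp hmem with ⟨q, hq, hq2⟩
            rcases List.mem_cons.mp hq with rfl | hq'
            · exact absurd (hq2 ▸ ht) hgt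
            · exact List.mem_map.mpr ⟨q, hq', hq2⟩
          exact ih _ hminL hidxL (Or.inr ⟨hb, hmemL⟩)
    · -- p never occurs in original: the step keeps b
      rw [pvStep_not_mem pos O _ hpos b p hpO]
      rcases hcase with hb | ⟨hb, hmem⟩
      · exact ih _ hminL hidxL (Or.inl hb)
      · have hmemL : x₀ ∈ L.map (·.2) := by
          rcases List.mem_map.mp hmem with ⟨q, hq, hq2⟩
          rcases List.mem_cons.mp hq with rfl | hq'
          · exact absurd (hq2 ▸ hx₀) hpO
          · exact List.mem_map.mpr ⟨q, hq', hq2⟩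
        exact ih _ hminL hidxL (Or.inr ⟨hb, hmemL⟩)

lemma pvMem_drop_of_idx {O : List String} {y : String} {t : Nat} (hy : y ∈ O)
    (h : t < O.idxOf y) : y ∈ O.drop (t+1) := by
  have hlt := List.idxOf_lt_length_of_mem hy
  have hsome : (O.drop (t+1))[O.idxOf y - (t+1)]? = some y := by
    rw [List.getElem?_drop]
    rw [show (t+1) + (O.idxOf y - (t+1)) = O.idxOf y from by omega]
    rw [List.getElem?_eq_getElem hlt, List.getElem_idxOf hlt]
  exact List.mem_of_getElem? hsome

lemma pvIdxOf_append_cons {u v : List String} {x : String} (hnd : (u ++ x :: v).Nodup) :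
    (u ++ x :: v).idxOf x = u.length := by
  have hxu : x ∉ u := by
    intro hm
    rw [List.nodup_append] at hnd
    exact hnd.2.2 x hm x List.mem_cons_self rfl
  rw [List.idxOf_append]
  simp [hxu, List.idxOf_cons_self]

-- the first follower found by A is the minimum-original-index follower picked by B
lemma pvFind_facts (O C : List String) (hnd : O.Nodup) (t : Nat) (htlen : t < O.length) (x₀ : String)
    (hf : (O.drop (t+1)).find? (fun x => decide (x ∈ C)) = some x₀) :
    x₀ ∈ C ∧ x₀ ∈ O ∧ t < O.idxOf x₀ ∧
      ∀ y, y ∈ C → y ∈ O → t < O.idxOf y → O.idxOf x₀ ≤ O.idxOf y := by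
  rw [List.find?_eq_some_iff_append] at hf
  obtain ⟨hpred, as, bs, hsplit, has⟩ := hf
  have hxC : x₀ ∈ C := by simpa using hpred
  have hO : O = O.take (t+1) ++ as ++ x₀ :: bs := by
    rw [List.append_assoc, ← hsplit, List.take_append_drop]
  have hlen : (O.take (t+1) ++ as).length = (t+1) + as.length := by
    simp [List.length_take]
    omega
  have hndO : ((O.take (t+1) ++ as) ++ x₀ :: bs).Nodup := by
    rw [← hO]; exact hnd
  have hidx : O.idxOf x₀ = (t+1) + as.length := by
    conv_lhs => rw [hO]
    rw [pvIdxOf_append_cons hndO, hlen]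
  have hxO : x₀ ∈ O := by rw [hO]; simp
  refine ⟨hxC, hxO, by omega, ?_⟩
  intro y hyC hyO hty
  by_contra hcon
  rw [not_le] at hcon
  -- y would sit strictly inside as, hence fail the predicate: contradiction
  have hylt := List.idxOf_lt_length_of_mem hyO
  have hk : (t+1) + (O.idxOf y - (t+1)) = O.idxOf y := by omega
  have hsome : (O.drop (t+1))[O.idxOf y - (t+1)]? = some y := by
    rw [List.getElem?_drop, hk, List.getElem?_eq_getElem hylt, List.getElem_idxOf hylt]
  have hyas : y ∈ as := by
    rw [hsplit] at hsome
    have hklt : O.idxOf y - (t+1) < as.length := by omega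
    rw [List.getElem?_append_left hklt] at hsome
    exact List.mem_of_getElem? hsome
  have := has y hyas
  simp [hyC] at this

-- the common non-trivial case: target ∈ original, target ∉ current
lemma pvMain (target : String) (C O : List String) (hndC : C.Nodup) (hndO : O.Nodup)
    (ho : target ∈ O) :
    (let target_index := (PySem.List.index? O target).getD 0
     let insert_at := pvFindInsertA O C
       (PySem.List.pyRange ((target_index : Int) + 1) (PySem.List.len O) 1)
     PySem.List.slice C none (some (insert_at : Int)) ++ [target] ++
       PySem.List.slice C (some (insert_at : Int)) none)
    = (let pos := (PySem.List.enumerate O 0).foldl (fun d p => d.insert p.2 p.1) PySem.Dict.empty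
       let t := (pos.get? target).getD 0
       let best := (PySem.List.enumerate C 0).foldl (pvStep pos t) none
       let insert_at : Int := match best with | some b => b.2 | none => PySem.List.len C
       PySem.List.slice C none (some insert_at) ++ [target] ++
         PySem.List.slice C (some insert_at) none) := by
  simp only []
  have hpos := pvPos_get O hndO
  have htA : (PySem.List.index? O target).getD 0 = O.idxOf target := pvIndex?_getD ho
  have htB : (((PySem.List.enumerate O 0).foldl (fun d p => d.insert p.2 p.1) PySem.Dict.empty).get? target).getD 0
      = ((O.idxOf target : Nat) : Int) := by
    rw [hpos target, if_pos ho]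
    rfl
  set t := O.idxOf target with htdef
  have htlen : t < O.length := List.idxOf_lt_length_of_mem ho
  have hcast : ((t : Int) + 1) = ((t + 1 : Nat) : Int) := by push_cast; ring
  have hA := pvA_loop_eq O C (O.length - (t+1)) (t+1) rfl
  rw [htA, PySem.List.len_eq, hcast, hA, htB]
  cases hF : (O.drop (t+1)).find? (fun x => decide (x ∈ C)) with
  | none =>
    have hnone : (PySem.List.enumerate C 0).foldl (pvStep ((PySem.List.enumerate O 0).foldl (fun d p => d.insert p.2 p.1) PySem.Dict.empty) (t : Int)) none = none := by
      apply pvB_fold_none _ O t hpos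
      intro p hp hpO hcon
      have hpC : p.2 ∈ C := by
        rcases (PySem.List.mem_enumerate_iff _ _ _).mp hp with ⟨k, hk, rfl⟩
        exact List.getElem_mem hk
      have hdrop := pvMem_drop_of_idx hpO hcon
      rw [List.find?_eq_none] at hF
      have := hF p.2 hdrop
      simp [hpC] at this
    rw [hnone]
    simp only [PySem.List.len_eq]
  | some x₀ =>
    obtain ⟨hxC, hxO, hxt, hmin⟩ := pvFind_facts O C hndO t htlen x₀ hF
    have hj₀ := List.idxOf_lt_length_of_mem hxC
    have hfold : (PySem.List.enumerate C 0).foldl (pvStep ((PySem.List.enumerate O 0).foldl (fun d p => d.insert p.2 p.1) PySem.Dict.empty) (t : Int)) none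
        = some ((O.idxOf x₀ : Int), ((C.idxOf x₀ : Nat) : Int)) := by
      apply pvB_fold_min _ O t hpos x₀ hxO hxt (C.idxOf x₀)
      · intro p hp hpO hgt
        have hpC : p.2 ∈ C := by
          rcases (PySem.List.mem_enumerate_iff _ _ _).mp hp with ⟨k, hk, rfl⟩
          exact List.getElem_mem hk
        exact hmin p.2 hpC hpO hgt
      · intro p hp hpx
        rcases (PySem.List.mem_enumerate_iff _ _ _).mp hp with ⟨k, hk, rfl⟩
        simp only [] at hpx ⊢
        rw [show (0 : Int) + (k : Int) = (k : Int) from by ring]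
        congr 1
        rw [← List.Nodup.idxOf_getElem hndC k hk, hpx]
      · right
        refine ⟨Or.inl rfl, ?_⟩
        rw [PySem.List.map_snd_enumerate]
        exact hxC
    rw [hfold]

-- ===== VERDICT (by name: the statement is the Claim_ definition above) =====
set_option maxHeartbeats 1000000 in
theorem restore_model_to_list_spec : Claim_equal_restore_model_to_list := by
  intro current_items original_items model_name _hdom
  unfold Spec_restore_model_to_list
  unfold restore_model_to_list restore_model_to_list_alt
  simp only []
  by_cases he : PySem.Str.strip model_name = ""
  · rw [if_pos he, if_pos (Or.inl he)]
  · rw [if_neg he]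
    by_cases hc : PySem.Str.strip model_name ∈ pvNorm current_items
    · rw [if_pos hc, if_pos (Or.inr hc)]
    · have hBor : ¬(PySem.Str.strip model_name = "" ∨ PySem.Str.strip model_name ∈ pvNorm current_items) := by
        rintro (h | h)
        · exact he h
        · exact hc h
      rw [if_neg hc, if_neg hBor]
      by_cases ho : PySem.Str.strip model_name ∈ pvNorm original_items
      · rw [if_neg (not_not_intro ho), if_neg (not_not_intro ho)]
        exact pvMain (PySem.Str.strip model_name) (pvNorm current_items) (pvNorm original_items)
          (pvNorm_nodup current_items) (pvNorm_nodup original_items) ho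
      · rw [if_pos ho, if_pos ho]
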